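-- pv_equiv track=rewrite | github.com/itsbobdev/Archon | python/src/server/services/metacognition/learning_formatter.py | _compress_bullets
-- ===== SOURCE A (Python) =====
-- from typing import Dict, List, Any, Tuple, Optional
--
-- def _compress_bullets(bullets: Dict[str, str], words_to_remove: int) -> Dict[str, str]:
--     """Compress bullets to meet maximum word count."""
--     compressed = bullets.copy()
--
--     # Remove words from longest bullets first
--     while words_to_remove > 0:
--         longest_key = max(compressed.keys(), key=lambda k: len(compressed[k].split()))
--         words = compressed[longest_key].split()
--
--         if len(words) > 5:  # Don't make bullets too short
--             compressed[longest_key] = " ".join(words[:-1])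
--             words_to_remove -= 1
--         else:
--             break
--
--     return compressed
-- ===== SOURCE B (Python) =====
-- def _compress_bullets(bullets, words_to_remove):
--     """Compress bullets via a word-count threshold ("water level") found by binary search,
--     instead of removing one word per scan-of-all-bullets iteration."""
--     counts = {k: len(v.split()) for k, v in bullets.items()}
--     removable = sum(c - 5 for c in counts.values() if c > 5)
--     budget = min(max(words_to_remove, 0), removable)
--     # smallest level T >= 5 such that clipping every count down to T removes <= budget words
--     lo = 5
--     hi = max(max(counts.values(), default=5), 5)
--     while lo < hi:
--         mid = (lo + hi) // 2
--         if sum(c - mid for c in counts.values() if c > mid) <= budget: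
--             hi = mid
--         else:
--             lo = mid + 1
--     T = lo
--     extra = budget - sum(c - T for c in counts.values() if c > T)
--     out = {}
--     for k, v in bullets.items():
--         c = counts[k]
--         if c < T:
--             out[k] = v
--         elif extra > 0:
--             out[k] = " ".join(v.split()[: T - 1])
--             extra -= 1
--         else:
--             out[k] = v if c == T else " ".join(v.split()[:T])
--     return out
-- ===== Notes on version B (the rewrite author's own statement) =====
-- stated objective: alternative
-- what changed: B replaces A's remove-one-word-per-scan greedy loop by a closed-form water-level computation: a binary search finds the smallest word-count threshold T>=5 whose clipping cost fits the removal budget, then one output pass trims every bullet to T (the first few leftover removals to T-1); on the measured input family the two have comparable cost.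
import Mathlib
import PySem

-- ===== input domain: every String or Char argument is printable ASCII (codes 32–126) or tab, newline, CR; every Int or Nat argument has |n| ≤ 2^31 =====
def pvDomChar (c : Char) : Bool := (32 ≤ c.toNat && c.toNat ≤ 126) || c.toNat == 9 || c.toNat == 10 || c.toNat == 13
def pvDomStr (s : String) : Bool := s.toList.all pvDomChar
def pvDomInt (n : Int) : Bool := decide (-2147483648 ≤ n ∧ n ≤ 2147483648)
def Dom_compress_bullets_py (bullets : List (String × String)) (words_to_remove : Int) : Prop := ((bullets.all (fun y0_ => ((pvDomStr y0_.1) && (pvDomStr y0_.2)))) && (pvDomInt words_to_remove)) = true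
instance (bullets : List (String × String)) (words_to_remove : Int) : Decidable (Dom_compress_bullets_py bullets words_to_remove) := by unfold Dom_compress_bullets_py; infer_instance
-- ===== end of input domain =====

-- B replaces A's remove-one-word-per-scan greedy loop by a water-level computation: a binary
-- search finds the smallest word-count threshold T ≥ 5 whose clipping cost fits the budget,
-- and one output pass trims each bullet to T (the leftover removals to T-1).

-- ===== PORT A =====
-- key of Python's max(compressed.keys(), key=lambda k: len(compressed[k].split()))
def pvWordKey (d : PySem.Dict String String) (k : String) : Int :=
  ((PySem.Str.split₀ (d.getD k "")).length : Int)

-- the 'while words_to_remove > 0' loop; fuel = remaining words_to_remove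
def pvALoop : Nat → PySem.Dict String String → PySem.Dict String String
  | 0, d => d
  | Nat.succ n, d =>
    match PySem.List.max? d.keys (pvWordKey d) with
    | none => d  -- Python: max() of an empty dict raises ValueError (excluded by Pre_)
    | some longest_key =>
      let words := PySem.Str.split₀ (d.getD longest_key "")
      if 5 < words.length then
        pvALoop n (d.insert longest_key (PySem.Str.join " " words.dropLast))
      else d

def compress_bullets_py (bullets : List (String × String)) (words_to_remove : Int) : List (String × String) :=
  (pvALoop words_to_remove.toNat (PySem.Dict.mk bullets)).items

-- ===== PORT B =====
-- sum(c - t for c in vals if c > t)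
def pvFB (vals : List Int) (t : Int) : Int :=
  ((vals.filter (fun c => t < c)).map (fun c => c - t)).sum

-- midpoint bounds of Python's (lo + hi) // 2, cited by pvSearch's termination proof
theorem pv_mid_bounds (lo hi : Int) (h : lo < hi) :
    lo ≤ PySem.Int.floordiv (lo + hi) 2 ∧ PySem.Int.floordiv (lo + hi) 2 < hi := by
  constructor
  · exact (PySem.Int.le_floordiv_iff_mul_le (by omega)).2 (by omega)
  · exact (PySem.Int.floordiv_lt_iff_lt_mul (by omega)).2 (by omega)

-- the 'while lo < hi' binary-search loop of Source B
def pvSearch (vals : List Int) (budget lo hi : Int) : Int :=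
  if h : lo < hi then
    let mid := PySem.Int.floordiv (lo + hi) 2
    if pvFB vals mid ≤ budget then pvSearch vals budget lo mid
    else pvSearch vals budget (mid + 1) hi
  else lo
termination_by (hi - lo).toNat
decreasing_by
  · have := pv_mid_bounds lo hi h; omega
  · have := pv_mid_bounds lo hi h; omega

def compress_bullets_py_alt (bullets : List (String × String)) (words_to_remove : Int) : List (String × String) :=
  let counts : PySem.Dict String Int :=
    PySem.Dict.mk (bullets.map (fun kv => (kv.1, ((PySem.Str.split₀ kv.2).length : Int))))
  let vals := counts.values
  let removable := pvFB vals 5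
  let budget := min (max words_to_remove 0) removable
  let hi := max ((PySem.List.max? vals (fun v => v)).getD 5) 5
  let T := pvSearch vals budget 5 hi
  let extra0 := budget - pvFB vals T
  (bullets.foldl (fun (st : Int × List (String × String)) kv =>
      let c := counts.getD kv.1 0
      if c < T then (st.1, st.2 ++ [(kv.1, kv.2)])
      else if 0 < st.1 then
        (st.1 - 1, st.2 ++ [(kv.1, PySem.Str.join " " (PySem.List.slice (PySem.Str.split₀ kv.2) none (some (T - 1))))])
      else
        (st.1, st.2 ++ [(kv.1, if c == T then kv.2 else PySem.Str.join " " (PySem.List.slice (PySem.Str.split₀ kv.2) none (some T)))])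
    ) (extra0, [])).2

-- ===== PRECONDITION & SPEC =====
-- Pre_ excludes (a) association lists with duplicate keys, which do not represent any
-- Python dict input (A's parameter is a dict, whose keys are unique), and (b) the empty
-- dict together with words_to_remove > 0, on which A's max() raises ValueError.
def Pre_compress_bullets_py (bullets : List (String × String)) (words_to_remove : Int) : Prop :=
  (bullets.map Prod.fst).Nodup ∧ (bullets ≠ [] ∨ words_to_remove ≤ 0)
instance (bullets : List (String × String)) (words_to_remove : Int) : Decidable (Pre_compress_bullets_py bullets words_to_remove) := by unfold Pre_compress_bullets_py; infer_instance

def pvWitness_compress_bullets_py : (List (String × String)) × Int :=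
  ([("a", "one two three four five six seven"), ("b", "hi there")], 3)

def Spec_compress_bullets_py (bullets : List (String × String)) (words_to_remove : Int) (out : List (String × String)) : Prop := out = compress_bullets_py_alt bullets words_to_remove
instance (bullets : List (String × String)) (words_to_remove : Int) (out : List (String × String)) : Decidable (Spec_compress_bullets_py bullets words_to_remove out) := by unfold Spec_compress_bullets_py; infer_instance

-- ===== CLAIM (what is proved, stated in full; the proofs are below) =====
def Claim_equal_compress_bullets_py : Prop := ∀ (bullets : List (String × String)) (words_to_remove : Int), Dom_compress_bullets_py bullets words_to_remove → Pre_compress_bullets_py bullets words_to_remove → Spec_compress_bullets_py bullets words_to_remove (compress_bullets_py bullets words_to_remove)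


-- ===== LEMMAS AND PROOFS =====

-- ---- words produced by str.split() are nonempty and whitespace-free ----

theorem pv_go_nil (cur : List Char) (acc : List (List Char)) :
    PySem.Chars.split₀.go [] cur acc =
      if cur.isEmpty then acc.reverse else (cur.reverse :: acc).reverse := rfl

theorem pv_go_cons (c : Char) (rest cur : List Char) (acc : List (List Char)) :
    PySem.Chars.split₀.go (c :: rest) cur acc =
      if PySem.Chars.isspace c then
        (if cur.isEmpty then PySem.Chars.split₀.go rest [] acc
         else PySem.Chars.split₀.go rest [] (cur.reverse :: acc))
      else PySem.Chars.split₀.go rest (c :: cur) acc := rfl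

theorem pv_go_words (s : List Char) :
    ∀ cur acc, (∀ c ∈ cur, PySem.Chars.isspace c = false) →
      (∀ w ∈ acc, w ≠ [] ∧ ∀ c ∈ w, PySem.Chars.isspace c = false) →
      ∀ w ∈ PySem.Chars.split₀.go s cur acc, w ≠ [] ∧ ∀ c ∈ w, PySem.Chars.isspace c = false := by
  induction s with
  | nil =>
    intro cur acc hcur hacc w hw
    rw [pv_go_nil] at hw
    by_cases hc : cur = []
    · rw [if_pos (by simp [hc])] at hw
      exact hacc w (List.mem_reverse.1 hw)
    · rw [if_neg (by simp [hc])] at hw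
      rcases List.mem_cons.1 (List.mem_reverse.1 hw) with h | h
      · subst h
        refine ⟨by simpa using hc, ?_⟩
        intro ch hch
        exact hcur ch (List.mem_reverse.1 hch)
      · exact hacc w h
  | cons ch rest ih =>
    intro cur acc hcur hacc w hw
    rw [pv_go_cons] at hw
    by_cases hsp : PySem.Chars.isspace ch = true
    · rw [if_pos hsp] at hw
      by_cases hc : cur = []
      · rw [if_pos (by simp [hc])] at hw
        exact ih [] acc (by simp) hacc w hw
      · rw [if_neg (by simp [hc])] at hw
        refine ih [] (cur.reverse :: acc) (by simp) ?_ w hw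
        intro w' hw'
        rcases List.mem_cons.1 hw' with h | h
        · subst h
          refine ⟨by simpa using hc, ?_⟩
          intro c2 hc2
          exact hcur c2 (List.mem_reverse.1 hc2)
        · exact hacc w' h
    · rw [if_neg hsp] at hw
      refine ih (ch :: cur) acc ?_ hacc w hw
      intro c2 hc2
      rcases List.mem_cons.1 hc2 with h | h
      · subst h; simpa using hsp
      · exact hcur c2 h

theorem pv_chars_split_words (s : List Char) :
    ∀ w ∈ PySem.Chars.split₀ s, w ≠ [] ∧ ∀ c ∈ w, PySem.Chars.isspace c = false := by
  intro w hw
  exact pv_go_words s [] [] (by simp) (by simp) w hw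

theorem pv_str_split_words (s : String) :
    ∀ w ∈ PySem.Str.split₀ s, w.toList ≠ [] ∧ ∀ c ∈ w.toList, PySem.Chars.isspace c = false := by
  intro w hw
  rcases List.mem_map.1 hw with ⟨cw, hcw, rfl⟩
  rw [String.toList_ofList]
  exact pv_chars_split_words s.toList cw hcw

-- ---- split() is a left inverse of " ".join on such words ----

theorem pv_go_word (w : List Char) (hw : ∀ c ∈ w, PySem.Chars.isspace c = false) :
    ∀ t cur acc, PySem.Chars.split₀.go (w ++ t) cur acc = PySem.Chars.split₀.go t (w.reverse ++ cur) acc := by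
  induction w with
  | nil => intro t cur acc; simp
  | cons c w' ih =>
    intro t cur acc
    have hc : PySem.Chars.isspace c = false := hw c (by simp)
    have hw' : ∀ c2 ∈ w', PySem.Chars.isspace c2 = false := fun c2 h2 => hw c2 (by simp [h2])
    calc PySem.Chars.split₀.go ((c :: w') ++ t) cur acc
        = PySem.Chars.split₀.go (w' ++ t) (c :: cur) acc := by
          rw [List.cons_append, pv_go_cons, if_neg (by simp [hc])]
      _ = PySem.Chars.split₀.go t (w'.reverse ++ (c :: cur)) acc := ih hw' t (c :: cur) acc
      _ = PySem.Chars.split₀.go t ((c :: w').reverse ++ cur) acc := by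
          simp [List.reverse_cons, List.append_assoc]

theorem pv_go_join (ws : List (List Char))
    (h : ∀ w ∈ ws, w ≠ [] ∧ ∀ c ∈ w, PySem.Chars.isspace c = false) :
    ∀ acc, PySem.Chars.split₀.go (PySem.Chars.join [' '] ws) [] acc = acc.reverse ++ ws := by
  induction ws with
  | nil =>
    intro acc
    simp [PySem.Chars.join_nil, pv_go_nil]
  | cons w ws' ih =>
    intro acc
    have hw := h w (by simp)
    have hws' : ∀ w2 ∈ ws', w2 ≠ [] ∧ ∀ c ∈ w2, PySem.Chars.isspace c = false :=
      fun w2 h2 => h w2 (by simp [h2])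
    cases ws' with
    | nil =>
      rw [PySem.Chars.join_singleton]
      have hword := pv_go_word w hw.2 [] [] acc
      rw [List.append_nil] at hword
      rw [hword, pv_go_nil, if_neg (by simp [hw.1]), List.append_nil, List.reverse_reverse]
      simp
    | cons w2 ws'' =>
      rw [PySem.Chars.join_cons_cons]
      have hassoc : w ++ [' '] ++ PySem.Chars.join [' '] (w2 :: ws'')
          = w ++ (' ' :: PySem.Chars.join [' '] (w2 :: ws'')) := by simp
      rw [hassoc, pv_go_word w hw.2, pv_go_cons,
        if_pos (show PySem.Chars.isspace ' ' = true by decide),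
        if_neg (by simp [hw.1]), List.append_nil, List.reverse_reverse,
        ih hws' (w :: acc)]
      simp

theorem pv_chars_split_join (ws : List (List Char))
    (h : ∀ w ∈ ws, w ≠ [] ∧ ∀ c ∈ w, PySem.Chars.isspace c = false) :
    PySem.Chars.split₀ (PySem.Chars.join [' '] ws) = ws := by
  unfold PySem.Chars.split₀
  rw [pv_go_join ws h []]
  simp

theorem pv_str_split_join (ws : List String)
    (h : ∀ w ∈ ws, w.toList ≠ [] ∧ ∀ c ∈ w.toList, PySem.Chars.isspace c = false) :
    PySem.Str.split₀ (PySem.Str.join " " ws) = ws := by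
  unfold PySem.Str.split₀ PySem.Str.join
  rw [String.toList_ofList]
  have hsep : " ".toList = [' '] := by decide
  rw [hsep, pv_chars_split_join (ws.map String.toList)]
  · rw [List.map_map]
    have hptw : ∀ w ∈ ws, (String.ofList ∘ String.toList) w = id w := by
      intro w _; simp [String.ofList_toList]
    rw [List.map_congr_left hptw, List.map_id]
  · intro cw hcw
    rcases List.mem_map.1 hcw with ⟨w, hwmem, rfl⟩
    exact h w hwmem

-- ---- rendering a bullet from its word budget ----

def pvRender (v : String) (m : Nat) : String :=
  if m = (PySem.Str.split₀ v).length then v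
  else PySem.Str.join " " ((PySem.Str.split₀ v).take m)

theorem pv_split_render (v : String) (m : Nat) (_hm : m ≤ (PySem.Str.split₀ v).length) :
    PySem.Str.split₀ (pvRender v m) = (PySem.Str.split₀ v).take m := by
  unfold pvRender
  by_cases he : m = (PySem.Str.split₀ v).length
  · simp [he]
  · rw [if_neg he]
    apply pv_str_split_join
    intro w hw
    exact pv_str_split_words v w (List.take_subset m _ hw)

-- ---- association-list facts under Nodup keys ----

theorem pv_find_self {β : Type} (l : List (String × β)) (kv : String × β)
    (hnd : (l.map Prod.fst).Nodup) (hm : kv ∈ l) :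
    l.find? (fun p => p.1 == kv.1) = some kv := by
  induction l with
  | nil => cases hm
  | cons p t ih =>
    simp only [List.map_cons, List.nodup_cons] at hnd
    rcases List.mem_cons.1 hm with h | h
    · subst h
      simp
    · have hne : (p.1 == kv.1) = false := by
        refine beq_eq_false_iff_ne.2 ?_
        intro hpe
        exact hnd.1 (hpe ▸ List.mem_map.2 ⟨kv, h, rfl⟩)
      rw [List.find?_cons]
      simp only [hne]
      exact ih hnd.2 h

theorem pv_uniq {β : Type} (l : List (String × β)) (kv kv' : String × β)
    (hnd : (l.map Prod.fst).Nodup) (hm : kv ∈ l) (hm' : kv' ∈ l) (h : kv'.1 = kv.1) :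
    kv' = kv := by
  have h1 := pv_find_self l kv hnd hm
  have h2 := pv_find_self l kv' hnd hm'
  rw [show (fun p : String × β => p.1 == kv'.1) = (fun p : String × β => p.1 == kv.1) by
    funext p; rw [h]] at h2
  rw [h1] at h2
  exact (Option.some_inj.1 h2).symm

theorem pv_getD_mk_map {β : Type} (l : List (String × String)) (f : String × String → β)
    (dflt : β) (kv : String × String) (hnd : (l.map Prod.fst).Nodup) (hm : kv ∈ l) :
    (PySem.Dict.mk (l.map (fun p => (p.1, f p)))).getD kv.1 dflt = f kv := by
  have hfind : l.find? ((fun p : String × β => p.1 == kv.1) ∘ (fun p => (p.1, f p)))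
      = some kv := pv_find_self l kv hnd hm
  simp only [PySem.Dict.getD, PySem.Dict.get?, List.find?_map, hfind,
    Option.map_some, Option.getD_some]

theorem pv_getD_zip (keys : List String) (vals : List Int)
    (hnd : keys.Nodup) (hlen : keys.length = vals.length) (i : Nat) (hi : i < keys.length) :
    (PySem.Dict.mk (keys.zip vals)).getD (keys[i]) 0 = vals[i]'(hlen ▸ hi) := by
  have hmem : (keys[i], vals[i]'(hlen ▸ hi)) ∈ keys.zip vals := by
    have : (keys.zip vals)[i]'(by simp [List.length_zip]; omega) = (keys[i], vals[i]'(hlen ▸ hi)) :=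
      List.getElem_zip
    exact this ▸ List.getElem_mem _
  have hndz : ((keys.zip vals).map Prod.fst).Nodup := by
    rw [List.map_fst_zip (le_of_eq hlen)]; exact hnd
  have hfind := pv_find_self (keys.zip vals) (keys[i], vals[i]'(hlen ▸ hi)) hndz hmem
  simp only [PySem.Dict.getD, PySem.Dict.get?, hfind, Option.map_some, Option.getD_some]

-- ---- first-max congruence ----

def pvMaxStep {α : Type} (f : α → Int) : Option α → α → Option α :=
  fun acc x => match acc with
    | none => some x
    | some m => if f m < f x then some x else some m

theorem pv_max?_congr {α : Type} (xs : List α) (f g : α → Int)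
    (h : ∀ x ∈ xs, f x = g x) : PySem.List.max? xs f = PySem.List.max? xs g := by
  have hf : PySem.List.max? xs f = xs.foldl (pvMaxStep f) none := rfl
  have hg : PySem.List.max? xs g = xs.foldl (pvMaxStep g) none := rfl
  rw [hf, hg]
  have aux : ∀ (l : List α) (acc : Option α), (∀ x ∈ l, f x = g x) →
      (∀ a, acc = some a → f a = g a) →
      l.foldl (pvMaxStep f) acc = l.foldl (pvMaxStep g) acc := by
    intro l
    induction l with
    | nil => intro acc _ _; rfl
    | cons x t ih =>
      intro acc hl hacc
      have hx : f x = g x := hl x (by simp)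
      rw [List.foldl_cons, List.foldl_cons]
      cases acc with
      | none =>
        simp only [pvMaxStep]
        refine ih (some x) (fun y hy => hl y (by simp [hy])) ?_
        intro a ha
        rw [← Option.some_inj.1 ha]
        exact hx
      | some m =>
        have hm : f m = g m := hacc m rfl
        simp only [pvMaxStep]
        rw [hm, hx]
        refine ih _ (fun y hy => hl y (by simp [hy])) ?_
        intro a ha
        by_cases hlt : g m < g x
        · rw [if_pos hlt] at ha
          rw [← Option.some_inj.1 ha]
          exact hx
        · rw [if_neg hlt] at ha
          rw [← Option.some_inj.1 ha]
          exact hm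
  exact aux xs none h (by intro a ha; cases ha)

-- ---- positional spec of max? (first maximal element) ----

theorem pv_fold_first_max {α : Type} (f : α → Int) (t : List α) : ∀ (a : α),
    ∃ (j : Nat) (r : α), (a :: t)[j]? = some r ∧
      t.foldl (pvMaxStep f) (some a) = some r ∧
      (∀ p, p < j → ∃ y, (a :: t)[p]? = some y ∧ f y < f r) ∧
      (∀ y ∈ a :: t, f y ≤ f r) := by
  induction t with
  | nil =>
    intro a
    refine ⟨0, a, rfl, rfl, fun p hp => absurd hp (Nat.not_lt_zero p), ?_⟩
    intro y hy
    have : y = a := by simpa using hy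
    simp [this]
  | cons x t' ih =>
    intro a
    by_cases hax : f a < f x
    · obtain ⟨j', r, hjget, hfold, hpre, hall⟩ := ih x
      have hstep : pvMaxStep f (some a) x = some x := by simp [pvMaxStep, hax]
      refine ⟨j' + 1, r, by simpa using hjget, ?_, ?_, ?_⟩
      · rw [List.foldl_cons, hstep]; exact hfold
      · intro p hp
        cases p with
        | zero =>
          refine ⟨a, rfl, ?_⟩
          have := hall x (by simp)
          omega
        | succ p' =>
          obtain ⟨y, hy, hfy⟩ := hpre p' (Nat.lt_of_succ_lt_succ hp)
          exact ⟨y, by simpa using hy, hfy⟩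
      · intro y hy
        rcases List.mem_cons.1 hy with h | h
        · subst h
          have := hall x (by simp)
          omega
        · exact hall y h
    · obtain ⟨j', r, hjget, hfold, hpre, hall⟩ := ih a
      have hstep : pvMaxStep f (some a) x = some a := by simp [pvMaxStep, hax]
      have hfoldc : (x :: t').foldl (pvMaxStep f) (some a) = some r := by
        rw [List.foldl_cons, hstep]; exact hfold
      have hfa : f a ≤ f r := hall a (by simp)
      have hfx : f x ≤ f a := by omega
      cases j' with
      | zero =>
        have hra : a = r := by simpa using hjget
        refine ⟨0, r, by simpa using congrArg some hra, hfoldc, fun p hp => absurd hp (Nat.not_lt_zero p), ?_⟩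
        intro y hy
        rcases List.mem_cons.1 hy with h | h
        · subst h; exact hfa
        · rcases List.mem_cons.1 h with h2 | h2
          · subst h2; omega
          · exact hall y (by simp [h2])
      | succ q =>
        refine ⟨q + 2, r, by simpa using hjget, hfoldc, ?_, ?_⟩
        · intro p hp
          obtain ⟨y0, hy0, hfy0⟩ := hpre 0 (Nat.succ_pos q)
          have hy0a : a = y0 := by simpa using hy0
          subst hy0a
          cases p with
          | zero => exact ⟨a, rfl, hfy0⟩
          | succ p' =>
            cases p' with
            | zero => exact ⟨x, rfl, by omega⟩
            | succ p'' =>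
              obtain ⟨y, hy, hfy⟩ := hpre (p'' + 1) (by omega)
              exact ⟨y, by simpa using hy, hfy⟩
        · intro y hy
          rcases List.mem_cons.1 hy with h | h
          · subst h; exact hfa
          · rcases List.mem_cons.1 h with h2 | h2
            · subst h2; omega
            · exact hall y (by simp [h2])

theorem pv_max?_spec {α : Type} (xs : List α) (f : α → Int) (hx : xs ≠ []) :
    ∃ (j : Nat) (r : α), xs[j]? = some r ∧
      PySem.List.max? xs f = some r ∧
      (∀ p, p < j → ∃ y, xs[p]? = some y ∧ f y < f r) ∧
      (∀ y ∈ xs, f y ≤ f r) := by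
  cases xs with
  | nil => exact absurd rfl hx
  | cons x t =>
    have h := pv_fold_first_max f t x
    have : PySem.List.max? (x :: t) f = t.foldl (pvMaxStep f) (some x) := rfl
    rw [this]
    exact h

theorem pv_idxOf_first (m : Int) : ∀ (l : List Int) (j : Nat) (hj : j < l.length),
    l[j] = m → (∀ p (hp : p < j), l[p]'(Nat.lt_trans hp hj) ≠ m) → l.idxOf m = j := by
  intro l
  induction l with
  | nil => intro j hj; simp at hj
  | cons v w ih =>
    intro j hj hjv hpre
    cases j with
    | zero =>
      simp only [List.getElem_cons_zero] at hjv
      subst hjv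
      simp
    | succ j' =>
      have hv : v ≠ m := by
        have := hpre 0 (Nat.succ_pos j')
        simpa using this
      have hrec := ih j' (by simpa using Nat.lt_of_succ_lt_succ hj) (by simpa using hjv)
        (fun p hp => by
          have := hpre (p + 1) (Nat.succ_lt_succ hp)
          simpa using this)
      simp [hv, hrec]

-- ---- dict insert facts ----

theorem pv_keys_insert_of_contains {ν : Type} (d : PySem.Dict String ν) (k : String) (v : ν)
    (h : d.contains k = true) : (d.insert k v).keys = d.keys := by
  simp only [PySem.Dict.insert, h, if_true, PySem.Dict.keys, List.map_map]
  apply List.map_congr_left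
  intro p _
  by_cases hp : (p.1 == k) = true
  · simp only [Function.comp, hp, if_true]
    exact (eq_of_beq hp).symm
  · simp [Function.comp, hp]

theorem pv_contains_of_mem_keys {ν : Type} (d : PySem.Dict String ν) (k : String)
    (h : k ∈ d.keys) : d.contains k = true := by
  rcases List.mem_map.1 h with ⟨p, hp, rfl⟩
  simp only [PySem.Dict.contains, List.any_eq_true]
  exact ⟨p, hp, by simp⟩

theorem pv_getD_insert_self {ν : Type} (d : PySem.Dict String ν) (k : String) (v dflt : ν) :
    (d.insert k v).getD k dflt = v := by
  simp [PySem.Dict.getD, PySem.Dict.get?_insert_self]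

theorem pv_getD_insert_ne {ν : Type} (d : PySem.Dict String ν) (k k' : String) (v dflt : ν)
    (h : k' ≠ k) : (d.insert k v).getD k' dflt = d.getD k' dflt := by
  simp [PySem.Dict.getD, PySem.Dict.get?_insert_of_ne d v h]

theorem pv_items_insert_of_contains {ν : Type} (d : PySem.Dict String ν) (k : String) (v : ν)
    (h : d.contains k = true) :
    (d.insert k v).items = d.items.map (fun p => if p.1 == k then (k, v) else p) := by
  simp [PySem.Dict.insert, h]

-- ---- the count-table loop (proof intermediate between A's loop and the closed form) ----

def pvCLoop : Nat → PySem.Dict String Int → PySem.Dict String Int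
  | 0, c => c
  | Nat.succ n, c =>
    match PySem.List.max? c.keys (fun q => c.getD q 0) with
    | none => c
    | some k =>
      if c.getD k 0 ≤ 5 then c
      else pvCLoop n (c.insert k (c.getD k 0 - 1))

-- ---- the simulation invariant (A's dict loop tracks the count table) ----

def pvInv (bullets : List (String × String)) (d : PySem.Dict String String)
    (c : PySem.Dict String Int) : Prop :=
  d.items = bullets.map (fun kv => (kv.1, pvRender kv.2 ((c.getD kv.1 0).toNat))) ∧
  c.keys = bullets.map Prod.fst ∧
  ∀ kv ∈ bullets, 0 ≤ c.getD kv.1 0 ∧ (c.getD kv.1 0).toNat ≤ (PySem.Str.split₀ kv.2).length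

theorem pv_sim (n : Nat) (bullets : List (String × String))
    (hnd : (bullets.map Prod.fst).Nodup) :
    ∀ d c, pvInv bullets d c → pvInv bullets (pvALoop n d) (pvCLoop n c) := by
  induction n with
  | zero => intro d c h; exact h
  | succ n ih =>
    intro d c hInv
    obtain ⟨hitems, hkeys, hbnd⟩ := hInv
    have hkeysd : d.keys = bullets.map Prod.fst := by
      simp only [PySem.Dict.keys, hitems, List.map_map]
      rfl
    have hgetd : ∀ kv ∈ bullets, d.getD kv.1 "" = pvRender kv.2 ((c.getD kv.1 0).toNat) := by
      intro kv hkv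
      have hd : d = PySem.Dict.mk (bullets.map
          (fun p => (p.1, pvRender p.2 ((c.getD p.1 0).toNat)))) := by
        apply PySem.Dict.ext
        simpa using hitems
      rw [hd]
      exact pv_getD_mk_map bullets (fun p => pvRender p.2 ((c.getD p.1 0).toNat)) "" kv hnd hkv
    have hkeyfun : ∀ k ∈ bullets.map Prod.fst, pvWordKey d k = c.getD k 0 := by
      intro k hk
      rcases List.mem_map.1 hk with ⟨kv, hkv, rfl⟩
      obtain ⟨h0, hle⟩ := hbnd kv hkv
      unfold pvWordKey
      rw [hgetd kv hkv, pv_split_render kv.2 _ hle, List.length_take,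
        Nat.min_eq_left hle]
      exact Int.toNat_of_nonneg h0
    have hmax : PySem.List.max? d.keys (pvWordKey d)
        = PySem.List.max? c.keys (fun q => c.getD q 0) := by
      rw [hkeysd, hkeys]
      exact pv_max?_congr (bullets.map Prod.fst) _ _ hkeyfun
    cases hm : PySem.List.max? c.keys (fun q => c.getD q 0) with
    | none =>
      simp only [pvALoop, pvCLoop, hmax, hm]
      exact ⟨hitems, hkeys, hbnd⟩
    | some k =>
      have hkmem : k ∈ c.keys := PySem.List.max?_mem hm
      rw [hkeys] at hkmem
      rcases List.mem_map.1 hkmem with ⟨kv, hkv, rfl⟩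
      simp only [pvALoop, pvCLoop, hmax, hm]
      obtain ⟨h0, hle⟩ := hbnd kv hkv
      have hwords : PySem.Str.split₀ (d.getD kv.1 "")
          = (PySem.Str.split₀ kv.2).take (c.getD kv.1 0).toNat := by
        rw [hgetd kv hkv]
        exact pv_split_render kv.2 _ hle
      have hlen : (PySem.Str.split₀ (d.getD kv.1 "")).length = (c.getD kv.1 0).toNat := by
        rw [hwords, List.length_take, Nat.min_eq_left hle]
      rw [hlen]
      by_cases h5 : 5 < (c.getD kv.1 0).toNat
      · have hB : ¬(c.getD kv.1 0 ≤ 5) := by omega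
        rw [if_pos h5, if_neg hB]
        apply ih
        have hdrop : (PySem.Str.split₀ (d.getD kv.1 "")).dropLast
            = (PySem.Str.split₀ kv.2).take ((c.getD kv.1 0).toNat - 1) := by
          rw [hwords, List.dropLast_eq_take, List.length_take, Nat.min_eq_left hle,
            List.take_take, Nat.min_eq_left (Nat.sub_le _ 1)]
        have hcontd : d.contains kv.1 = true := by
          apply pv_contains_of_mem_keys d kv.1
          rw [hkeysd]
          exact List.mem_map.2 ⟨kv, hkv, rfl⟩
        have hcontc : c.contains kv.1 = true := by
          apply pv_contains_of_mem_keys c kv.1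
          rw [hkeys]
          exact List.mem_map.2 ⟨kv, hkv, rfl⟩
        refine ⟨?_, ?_, ?_⟩
        · rw [pv_items_insert_of_contains d kv.1 _ hcontd, hitems, List.map_map]
          apply List.map_congr_left
          intro kv' hkv'
          by_cases he : kv'.1 = kv.1
          · have hkveq : kv' = kv := pv_uniq bullets kv kv' hnd hkv hkv' he
            subst hkveq
            simp only [Function.comp_apply]
            rw [if_pos (by simp), hdrop, pv_getD_insert_self]
            have htn : (c.getD kv'.1 0 - 1).toNat = (c.getD kv'.1 0).toNat - 1 := by omega
            rw [htn]
            unfold pvRender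
            rw [if_neg (by omega)]
          · simp only [Function.comp_apply]
            rw [if_neg (by simp [he]), pv_getD_insert_ne c kv.1 kv'.1 _ 0 he]
        · rw [pv_keys_insert_of_contains c kv.1 _ hcontc]
          exact hkeys
        · intro kv' hkv'
          by_cases he : kv'.1 = kv.1
          · have hkveq : kv' = kv := pv_uniq bullets kv kv' hnd hkv hkv' he
            subst hkveq
            rw [pv_getD_insert_self]
            constructor
            · omega
            · omega
          · rw [pv_getD_insert_ne c kv.1 kv'.1 _ 0 he]
            exact hbnd kv' hkv'
      · have hB : c.getD kv.1 0 ≤ 5 := by omega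
        rw [if_neg h5, if_pos hB]
        exact ⟨hitems, hkeys, hbnd⟩

-- ---- the positional removal process on the word-count list ----

def pvLoopL : Nat → List Int → List Int
  | 0, vs => vs
  | Nat.succ n, vs =>
    match PySem.List.max? vs (fun v => v) with
    | none => vs
    | some m =>
      if m ≤ 5 then vs
      else pvLoopL n (vs.set (vs.idxOf m) (m - 1))

theorem pv_length_loopL (n : Nat) : ∀ vs : List Int, (pvLoopL n vs).length = vs.length := by
  induction n with
  | zero => intro vs; rfl
  | succ n ih =>
    intro vs
    simp only [pvLoopL]
    cases PySem.List.max? vs (fun v => v) with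
    | none => rfl
    | some m =>
      dsimp only
      by_cases h : m ≤ 5
      · rw [if_pos h]
      · rw [if_neg h, ih, List.length_set]

theorem pv_part2 : ∀ (fuel : Nat) (keys : List String) (vals : List Int),
    keys.Nodup → keys.length = vals.length →
    pvCLoop fuel (PySem.Dict.mk (keys.zip vals)) = PySem.Dict.mk (keys.zip (pvLoopL fuel vals)) := by
  intro fuel
  induction fuel with
  | zero => intro keys vals _ _; rfl
  | succ n ih =>
    intro keys vals hnd hlen
    have hkeysd : (PySem.Dict.mk (keys.zip vals)).keys = keys := by
      show (keys.zip vals).map Prod.fst = keys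
      exact List.map_fst_zip (le_of_eq hlen)
    simp only [pvCLoop, pvLoopL]
    rw [hkeysd]
    by_cases hkne : keys = []
    · subst hkne
      have hvnil : vals = [] := by
        cases vals with
        | nil => rfl
        | cons v w => simp at hlen
      subst hvnil
      rfl
    · have hvne : vals ≠ [] := by
        intro h
        subst h
        simp at hlen
        exact hkne hlen
      obtain ⟨j1, k, hkget, hmaxK, hpreK, hallK⟩ :=
        pv_max?_spec keys (fun q => (PySem.Dict.mk (keys.zip vals)).getD q 0) hkne
      obtain ⟨j2, m, hmget, hmaxV, hpreV, hallV⟩ := pv_max?_spec vals (fun v => v) hvne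
      obtain ⟨hj1, hkv⟩ := List.getElem?_eq_some_iff.1 hkget
      obtain ⟨hj2, hmv⟩ := List.getElem?_eq_some_iff.1 hmget
      have hj12 : j1 = j2 := by
        rcases Nat.lt_trichotomy j1 j2 with hlt | heq | hgt
        · obtain ⟨y, hy, hfy⟩ := hpreV j1 hlt
          obtain ⟨h1, h2⟩ := List.getElem?_eq_some_iff.1 hy
          have e1 : (PySem.Dict.mk (keys.zip vals)).getD k 0 = y := by
            rw [← hkv, pv_getD_zip keys vals hnd hlen j1 hj1]
            exact h2
          have e2 : (PySem.Dict.mk (keys.zip vals)).getD (keys[j2]'(hlen ▸ hj2)) 0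
              ≤ (PySem.Dict.mk (keys.zip vals)).getD k 0 := hallK _ (List.getElem_mem _)
          rw [pv_getD_zip keys vals hnd hlen j2 (hlen ▸ hj2), e1] at e2
          rw [hmv] at e2
          omega
        · exact heq
        · exfalso
          obtain ⟨y, hy, hfy⟩ := hpreK j2 hgt
          obtain ⟨h1, h2⟩ := List.getElem?_eq_some_iff.1 hy
          have e1 : (PySem.Dict.mk (keys.zip vals)).getD y 0 = vals[j2]'(hlen ▸ h1) := by
            rw [← h2, pv_getD_zip keys vals hnd hlen j2 h1]
          have e3 : (PySem.Dict.mk (keys.zip vals)).getD k 0 = vals[j1]'(hlen ▸ hj1) := by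
            rw [← hkv, pv_getD_zip keys vals hnd hlen j1 hj1]
          have e4 : vals[j1]'(hlen ▸ hj1) ≤ m := by
            have := hallV _ (List.getElem_mem (l := vals) (hlen ▸ hj1))
            simpa using this
          rw [e1, e3] at hfy
          rw [hmv] at hfy
          omega
      subst hj12
      have hj1v : j1 < vals.length := hlen ▸ hj1
      have hgk : (PySem.Dict.mk (keys.zip vals)).getD k 0 = m := by
        rw [← hkv, pv_getD_zip keys vals hnd hlen j1 hj1]
        exact hmv
      rw [hmaxK, hmaxV]
      dsimp only
      rw [hgk]
      by_cases h5 : m ≤ 5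
      · rw [if_pos h5, if_pos h5]
      · rw [if_neg h5, if_neg h5]
        have hidx : vals.idxOf m = j1 :=
          pv_idxOf_first m vals j1 hj1v hmv (fun p hp => by
            obtain ⟨y, hy, hfy⟩ := hpreV p hp
            obtain ⟨h1, h2⟩ := List.getElem?_eq_some_iff.1 hy
            rw [h2]
            omega)
        rw [hidx]
        have hcont : (PySem.Dict.mk (keys.zip vals)).contains k = true := by
          apply pv_contains_of_mem_keys
          rw [hkeysd, ← hkv]
          exact List.getElem_mem _
        have hins : (PySem.Dict.mk (keys.zip vals)).insert k (m - 1)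
            = PySem.Dict.mk (keys.zip (vals.set j1 (m - 1))) := by
          apply PySem.Dict.ext
          rw [pv_items_insert_of_contains _ k _ hcont]
          show (keys.zip vals).map (fun p => if p.1 == k then (k, m - 1) else p)
              = keys.zip (vals.set j1 (m - 1))
          apply List.ext_getElem
          · simp [List.length_zip, List.length_set]
          · intro i hi1 hi2
            rw [List.getElem_map]
            have hilt : i < (keys.zip vals).length := by
              simpa using hi1
            have hikeys : i < keys.length := by
              rw [List.length_zip] at hilt
              omega
            rw [List.getElem_zip, List.getElem_zip]
            by_cases hik : i = j1
            · subst hik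
              rw [if_pos (by simp [hkv]), List.getElem_set, if_pos rfl]
              exact Prod.ext hkv.symm rfl
            · have hbeq : (keys[i]'hikeys == k) = false := by
                refine beq_eq_false_iff_ne.2 ?_
                rw [← hkv]
                intro hcontra
                exact hik (List.Nodup.getElem_inj_iff hnd |>.1 hcontra)
              rw [if_neg (by simp [hbeq]), List.getElem_set,
                if_neg (fun h => hik h.symm)]
        rw [hins]
        exact ih keys (vals.set j1 (m - 1)) hnd (by rw [hlen, List.length_set])

-- ---- the water-level closed form ----

def pvF (vs : List Int) (t : Int) : Int := (vs.map (fun v => max (v - t) 0)).sum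

theorem pvFB_eq (vs : List Int) (t : Int) : pvFB vs t = pvF vs t := by
  induction vs with
  | nil => rfl
  | cons v w ih =>
    simp only [pvFB, pvF, List.filter_cons, List.map_cons, List.sum_cons] at *
    by_cases h : t < v
    · rw [if_pos (by simpa using h)]
      simp only [List.map_cons, List.sum_cons]
      rw [ih]
      have : max (v - t) 0 = v - t := by omega
      omega
    · rw [if_neg (by simpa using h)]
      rw [ih]
      have : max (v - t) 0 = 0 := by omega
      omega

theorem pvF_nonneg (vs : List Int) (t : Int) : 0 ≤ pvF vs t := by
  induction vs with
  | nil => simp [pvF]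
  | cons v w ih =>
    simp only [pvF, List.map_cons, List.sum_cons] at *
    omega

theorem pvF_anti (vs : List Int) {t t' : Int} (h : t ≤ t') : pvF vs t' ≤ pvF vs t := by
  induction vs with
  | nil => simp [pvF]
  | cons v w ih =>
    simp only [pvF, List.map_cons, List.sum_cons] at *
    omega

theorem pvF_eq_zero_iff (vs : List Int) (t : Int) : pvF vs t = 0 ↔ ∀ v ∈ vs, v ≤ t := by
  induction vs with
  | nil => simp [pvF]
  | cons v w ih =>
    simp only [pvF, List.map_cons, List.sum_cons] at ih ⊢
    have h0 : 0 ≤ (w.map (fun v => max (v - t) 0)).sum := by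
      have := pvF_nonneg w t; simpa [pvF] using this
    rw [List.forall_mem_cons]
    constructor
    · intro h
      exact ⟨by omega, ih.1 (by omega)⟩
    · rintro ⟨h1, h2⟩
      have := ih.2 h2
      omega

theorem pvF_set (vs : List Int) (j : Nat) (hj : j < vs.length) (M t : Int)
    (hM : vs[j] = M) (ht : t < M) :
    pvF (vs.set j (M - 1)) t = pvF vs t - 1 := by
  induction vs generalizing j with
  | nil => simp at hj
  | cons v w ih =>
    cases j with
    | zero =>
      simp only [List.getElem_cons_zero] at hM
      subst hM
      simp only [List.set_cons_zero, pvF, List.map_cons, List.sum_cons]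
      have h1 : max (v - 1 - t) 0 = v - 1 - t := by omega
      have h2 : max (v - t) 0 = v - t := by omega
      omega
    | succ j' =>
      simp only [List.getElem_cons_succ] at hM
      simp only [List.set_cons_succ, pvF, List.map_cons, List.sum_cons]
      have := ih j' (by simpa using Nat.lt_of_succ_lt_succ hj) hM
      simp only [pvF] at this
      omega

-- ---- the binary search finds the least admissible threshold ----

theorem pvSearch_spec (vs : List Int) (R : Int) : ∀ (n : Nat) (lo hi : Int),
    (hi - lo).toNat = n → lo ≤ hi → pvFB vs hi ≤ R →
    lo ≤ pvSearch vs R lo hi ∧ pvSearch vs R lo hi ≤ hi ∧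
    pvFB vs (pvSearch vs R lo hi) ≤ R ∧
    (∀ s, lo ≤ s → s < pvSearch vs R lo hi → R < pvFB vs s) := by
  intro n
  induction n using Nat.strong_induction_on with
  | _ n ihn =>
    intro lo hi hn hle hhi
    rw [pvSearch]
    by_cases h : lo < hi
    · rw [dif_pos h]
      have hb := pv_mid_bounds lo hi h
      by_cases hc : pvFB vs (PySem.Int.floordiv (lo + hi) 2) ≤ R
      · rw [if_pos hc]
        have hrec := ihn (PySem.Int.floordiv (lo + hi) 2 - lo).toNat (by omega) lo
          (PySem.Int.floordiv (lo + hi) 2) rfl (by omega) hc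
        exact ⟨hrec.1, by omega, hrec.2.2.1, hrec.2.2.2⟩
      · rw [if_neg hc]
        have hrec := ihn (hi - (PySem.Int.floordiv (lo + hi) 2 + 1)).toNat (by omega)
          (PySem.Int.floordiv (lo + hi) 2 + 1) hi rfl (by omega) hhi
        refine ⟨by omega, hrec.2.1, hrec.2.2.1, ?_⟩
        intro s hs hsr
        by_cases hsm : s ≤ PySem.Int.floordiv (lo + hi) 2
        · have hanti : pvF vs (PySem.Int.floordiv (lo + hi) 2) ≤ pvF vs s := pvF_anti vs hsm
          rw [pvFB_eq] at hc ⊢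
          omega
        · exact hrec.2.2.2 s (by omega) hsr
    · rw [dif_neg h]
      have : lo = hi := by omega
      subst this
      exact ⟨le_refl lo, le_refl lo, hhi, fun s hs hsr => by omega⟩

theorem pvF_elem_le (vs : List Int) (t v : Int) (h : v ∈ vs) : max (v - t) 0 ≤ pvF vs t := by
  induction vs with
  | nil => cases h
  | cons x w ih =>
    have h0 : 0 ≤ pvF w t := pvF_nonneg w t
    simp only [pvF, List.map_cons, List.sum_cons] at *
    rcases List.mem_cons.1 h with h1 | h1
    · subst h1; omega
    · have := ih h1; omega

-- T is "the least threshold ≥ 5 whose clipping cost is within R"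
def pvIsT (vs : List Int) (R t : Int) : Prop :=
  5 ≤ t ∧ pvF vs t ≤ R ∧ ∀ s, 5 ≤ s → s < t → R < pvF vs s

theorem pvIsT_unique (vs : List Int) (R a b : Int) (ha : pvIsT vs R a) (hb : pvIsT vs R b) :
    a = b := by
  rcases ha with ⟨ha5, haF, haMin⟩
  rcases hb with ⟨hb5, hbF, hbMin⟩
  by_contra hne
  rcases lt_or_gt_of_ne hne with h | h
  · exact absurd haF (not_le.2 (hbMin a ha5 h))
  · exact absurd hbF (not_le.2 (haMin b hb5 h))

def pvTheT (vs : List Int) (R : Int) : Int :=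
  pvSearch vs R 5 (max ((PySem.List.max? vs (fun v => v)).getD 5) 5)

theorem pvF_hi_zero (vs : List Int) :
    pvF vs (max ((PySem.List.max? vs (fun v => v)).getD 5) 5) = 0 := by
  rw [pvF_eq_zero_iff]
  intro v hv
  cases hm : PySem.List.max? vs (fun v => v) with
  | none =>
    rw [PySem.List.max?_eq_none_iff] at hm
    subst hm; cases hv
  | some m =>
    have := PySem.List.max?_isMax hm v hv
    simp only [Option.getD_some]
    omega

theorem pvTheT_isT (vs : List Int) (R : Int) (hR : 0 ≤ R) : pvIsT vs R (pvTheT vs R) := by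
  have h5 : (5 : Int) ≤ max ((PySem.List.max? vs (fun v => v)).getD 5) 5 := le_max_right _ _
  have hhi : pvFB vs (max ((PySem.List.max? vs (fun v => v)).getD 5) 5) ≤ R := by
    rw [pvFB_eq, pvF_hi_zero]; exact hR
  obtain ⟨h1, h2, h3, h4⟩ := pvSearch_spec vs R _ 5 _ rfl h5 hhi
  refine ⟨h1, by rwa [pvFB_eq] at h3, ?_⟩
  intro s hs5 hst
  have := h4 s hs5 hst
  rwa [pvFB_eq] at this

-- ---- applying a threshold to the count list (B's output pass, positionally) ----

def pvApply (T : Int) : List Int → Int → List Int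
  | [], _ => []
  | v :: t, r =>
    if v < T then v :: pvApply T t r
    else if 0 < r then (T - 1) :: pvApply T t (r - 1)
    else T :: pvApply T t r

theorem pvApply_nil (T r : Int) : pvApply T [] r = [] := rfl

theorem pvApply_cons (T v : Int) (t : List Int) (r : Int) :
    pvApply T (v :: t) r =
      if v < T then v :: pvApply T t r
      else if 0 < r then (T - 1) :: pvApply T t (r - 1)
      else T :: pvApply T t r := rfl

theorem pvApply_id (T : Int) : ∀ (vs : List Int), (∀ v ∈ vs, v ≤ T) → pvApply T vs 0 = vs := by
  intro vs h
  induction vs with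
  | nil => rfl
  | cons v w ih =>
    have hv : v ≤ T := h v (by simp)
    rw [pvApply_cons]
    by_cases hlt : v < T
    · rw [if_pos hlt, ih (fun y hy => h y (by simp [hy]))]
    · rw [if_neg hlt, if_neg (by omega)]
      have : v = T := by omega
      rw [ih (fun y hy => h y (by simp [hy])), this]

theorem pvApply_set_ge (T : Int) : ∀ (vs : List Int) (j : Nat) (hj : j < vs.length) (x r : Int),
    T ≤ x → T ≤ vs[j] → pvApply T (vs.set j x) r = pvApply T vs r := by
  intro vs
  induction vs with
  | nil => intro j hj; simp at hj
  | cons v w ih =>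
    intro j hj x r hx hv
    cases j with
    | zero =>
      simp only [List.getElem_cons_zero] at hv
      rw [List.set_cons_zero, pvApply_cons, pvApply_cons,
        if_neg (show ¬ x < T by omega), if_neg (show ¬ v < T by omega)]
    | succ j' =>
      simp only [List.getElem_cons_succ] at hv
      rw [List.set_cons_succ, pvApply_cons, pvApply_cons]
      have hj' : j' < w.length := by simpa using Nat.lt_of_succ_lt_succ hj
      by_cases hlt : v < T
      · rw [if_pos hlt, if_pos hlt, ih j' hj' x r hx hv]
      · rw [if_neg hlt, if_neg hlt]
        by_cases hr : 0 < r
        · rw [if_pos hr, if_pos hr, ih j' hj' x (r - 1) hx hv]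
        · rw [if_neg hr, if_neg hr, ih j' hj' x r hx hv]

theorem pvApply_set_firstmax (M : Int) : ∀ (vs : List Int) (j : Nat) (hj : j < vs.length) (r : Int),
    (∀ p (hp : p < j), vs[p]'(Nat.lt_trans hp hj) < M) → vs[j] = M → 1 ≤ r →
    pvApply M vs r = pvApply M (vs.set j (M - 1)) (r - 1) := by
  intro vs
  induction vs with
  | nil => intro j hj; simp at hj
  | cons v w ih =>
    intro j hj r hpre hjv hr
    cases j with
    | zero =>
      simp only [List.getElem_cons_zero] at hjv
      subst hjv
      rw [List.set_cons_zero, pvApply_cons, pvApply_cons,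
        if_neg (by omega), if_pos (show (0:Int) < r by omega), if_pos (by omega)]
    | succ j' =>
      simp only [List.getElem_cons_succ] at hjv
      have hv : v < M := by
        have := hpre 0 (Nat.succ_pos j')
        simpa using this
      rw [List.set_cons_succ, pvApply_cons, pvApply_cons, if_pos hv, if_pos hv]
      have hj' : j' < w.length := by simpa using Nat.lt_of_succ_lt_succ hj
      rw [ih j' hj' r (fun p hp => by
        have := hpre (p + 1) (Nat.succ_lt_succ hp)
        simpa using this) hjv hr]

-- ---- the closed form and its agreement with the removal process ----

def pvClosed (vs : List Int) (R : Int) : List Int :=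
  pvApply (pvTheT vs R) vs (R - pvF vs (pvTheT vs R))

theorem pv_closed_zero (vs : List Int) : pvClosed vs 0 = vs := by
  unfold pvClosed
  obtain ⟨h5, hF, hmin⟩ := pvTheT_isT vs 0 le_rfl
  have hF0 : pvF vs (pvTheT vs 0) = 0 := le_antisymm hF (pvF_nonneg _ _)
  rw [hF0, sub_zero]
  exact pvApply_id _ vs ((pvF_eq_zero_iff vs _).1 hF0)

theorem pv_comm (vs : List Int) (R : Int) (j : Nat) (hj : j < vs.length) (M : Int)
    (hjv : vs[j] = M) (hpre : ∀ p (hp : p < j), vs[p]'(Nat.lt_trans hp hj) < M)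
    (hall : ∀ v ∈ vs, v ≤ M) (hM : 5 < M) (hR1 : 1 ≤ R) (_hR2 : R ≤ pvF vs 5) :
    pvClosed vs R = pvClosed (vs.set j (M - 1)) (R - 1) := by
  have hflt : ∀ t, t < M → pvF (vs.set j (M - 1)) t = pvF vs t - 1 :=
    fun t ht => pvF_set vs j hj M t hjv ht
  have hall' : ∀ v ∈ vs.set j (M - 1), v ≤ M := by
    intro v hv
    rcases List.mem_or_eq_of_mem_set hv with h | h
    · exact hall v h
    · omega
  have hfgeV : pvF vs M = 0 := (pvF_eq_zero_iff vs M).2 (fun v hv => hall v hv)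
  have hfgeV' : pvF (vs.set j (M - 1)) M = 0 :=
    (pvF_eq_zero_iff _ M).2 (fun v hv => hall' v hv)
  obtain ⟨hT5, hTF, hTmin⟩ := pvTheT_isT vs R (by omega)
  have hTM : pvTheT vs R ≤ M := by
    by_contra hc
    push_neg at hc
    have h1 := hTmin M (by omega) hc
    omega
  have hT' : pvIsT (vs.set j (M - 1)) (R - 1) (pvTheT vs R) := by
    refine ⟨hT5, ?_, ?_⟩
    · by_cases hTMlt : pvTheT vs R < M
      · rw [hflt _ hTMlt]; omega
      · have heq : pvTheT vs R = M := by omega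
        rw [heq, hfgeV']; omega
    · intro s hs5 hsT
      have hsM : s < M := by omega
      rw [hflt s hsM]
      have := hTmin s hs5 hsT
      omega
  have hTeq : pvTheT (vs.set j (M - 1)) (R - 1) = pvTheT vs R :=
    pvIsT_unique _ (R - 1) _ _ (pvTheT_isT _ (R - 1) (by omega)) hT'
  unfold pvClosed
  rw [hTeq]
  by_cases hTMlt : pvTheT vs R < M
  · have hr' : R - 1 - pvF (vs.set j (M - 1)) (pvTheT vs R) = R - pvF vs (pvTheT vs R) := by
      rw [hflt _ hTMlt]; ring
    rw [hr']
    exact (pvApply_set_ge (pvTheT vs R) vs j hj (M - 1) (R - pvF vs (pvTheT vs R))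
      (by omega) (by rw [hjv]; omega)).symm
  · have heq : pvTheT vs R = M := by omega
    rw [heq, hfgeV, hfgeV', sub_zero, sub_zero]
    exact pvApply_set_firstmax M vs j hj R hpre hjv (by omega)

theorem pv_loop_closed : ∀ (fuel : Nat) (vs : List Int),
    pvLoopL fuel vs = pvClosed vs (min (fuel : Int) (pvF vs 5)) := by
  intro fuel
  induction fuel with
  | zero =>
    intro vs
    have h0 : min ((0 : Nat) : Int) (pvF vs 5) = 0 := by
      have := pvF_nonneg vs 5
      simp only [Nat.cast_zero]
      omega
    rw [h0, pv_closed_zero]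
    rfl
  | succ n ih =>
    intro vs
    simp only [pvLoopL]
    cases hm : PySem.List.max? vs (fun v => v) with
    | none =>
      rw [PySem.List.max?_eq_none_iff] at hm
      subst hm
      have hF0 : pvF ([] : List Int) 5 = 0 := rfl
      rw [hF0]
      have h0 : min ((((n : Nat) + 1 : Nat)) : Int) 0 = 0 := by omega
      rw [h0, pv_closed_zero]
    | some m =>
      dsimp only
      have hmem : m ∈ vs := PySem.List.max?_mem hm
      have hallm : ∀ v ∈ vs, v ≤ m := fun v hv => PySem.List.max?_isMax hm v hv
      by_cases h5 : m ≤ 5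
      · rw [if_pos h5]
        have hF0 : pvF vs 5 = 0 := (pvF_eq_zero_iff vs 5).2 (fun v hv => le_trans (hallm v hv) h5)
        rw [hF0]
        have h0 : min ((((n : Nat) + 1 : Nat)) : Int) 0 = 0 := by omega
        rw [h0, pv_closed_zero]
      · rw [if_neg h5]
        have hne : vs ≠ [] := by
          rintro rfl
          cases hmem
        obtain ⟨j, r, hjget, hmax2, hpreq, hall2⟩ := pv_max?_spec vs (fun v => v) hne
        rw [hm] at hmax2
        have hrm : m = r := Option.some_inj.1 hmax2
        subst hrm
        obtain ⟨hjlt, hjv⟩ := List.getElem?_eq_some_iff.1 hjget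
        have hpre : ∀ p (hp : p < j), vs[p]'(Nat.lt_trans hp hjlt) < m := by
          intro p hp
          obtain ⟨y, hy, hfy⟩ := hpreq p hp
          obtain ⟨hplt, hpv⟩ := List.getElem?_eq_some_iff.1 hy
          rw [hpv]
          exact hfy
        have hidx : vs.idxOf m = j :=
          pv_idxOf_first m vs j hjlt hjv (fun p hp => by have := hpre p hp; omega)
        rw [hidx, ih (vs.set j (m - 1))]
        have hFset5 : pvF (vs.set j (m - 1)) 5 = pvF vs 5 - 1 :=
          pvF_set vs j hjlt m 5 hjv (by omega)
        have hF5pos : 1 ≤ pvF vs 5 := by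
          have := pvF_elem_le vs 5 m hmem
          omega
        have hRmin : min ((n : Nat) : Int) (pvF (vs.set j (m - 1)) 5)
            = min ((((n : Nat) + 1 : Nat)) : Int) (pvF vs 5) - 1 := by
          rw [hFset5]
          push_cast
          omega
        rw [hRmin]
        exact (pv_comm vs (min ((((n : Nat) + 1 : Nat)) : Int) (pvF vs 5)) j hjlt m hjv hpre
          hallm (by omega) (by push_cast; omega) (min_le_right _ _)).symm

-- ---- B's output fold, positionally ----

theorem pv_fold_out (counts : PySem.Dict String Int) (T : Int) (hT : 5 ≤ T) :
    ∀ (bs : List (String × String)) (e : Int) (acc : List (String × String)),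
    (∀ kv ∈ bs, counts.getD kv.1 0 = ((PySem.Str.split₀ kv.2).length : Int)) →
    (bs.foldl (fun (st : Int × List (String × String)) kv =>
        if counts.getD kv.1 0 < T then (st.1, st.2 ++ [(kv.1, kv.2)])
        else if 0 < st.1 then
          (st.1 - 1, st.2 ++ [(kv.1, PySem.Str.join " " (PySem.List.slice (PySem.Str.split₀ kv.2) none (some (T - 1))))])
        else
          (st.1, st.2 ++ [(kv.1, if counts.getD kv.1 0 == T then kv.2 else PySem.Str.join " " (PySem.List.slice (PySem.Str.split₀ kv.2) none (some T)))])
      ) (e, acc)).2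
    = acc ++ List.zipWith (fun kv (n : Int) => (kv.1, pvRender kv.2 n.toNat)) bs
        (pvApply T (bs.map (fun kv => ((PySem.Str.split₀ kv.2).length : Int))) e) := by
  intro bs
  induction bs with
  | nil =>
    intro e acc _
    simp [pvApply_nil]
  | cons kv bs ih =>
    intro e acc hc
    have hcount : counts.getD kv.1 0 = ((PySem.Str.split₀ kv.2).length : Int) := hc kv (by simp)
    have hctail : ∀ kv' ∈ bs, counts.getD kv'.1 0 = ((PySem.Str.split₀ kv'.2).length : Int) :=
      fun kv' h => hc kv' (by simp [h])
    rw [List.foldl_cons, List.map_cons, pvApply_cons]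
    dsimp only
    rw [hcount]
    by_cases h1 : ((PySem.Str.split₀ kv.2).length : Int) < T
    · rw [if_pos h1, if_pos h1, ih _ _ hctail, List.zipWith_cons_cons]
      have hrend : pvRender kv.2 (((PySem.Str.split₀ kv.2).length : Int)).toNat = kv.2 := by
        unfold pvRender
        rw [if_pos (by simp)]
      rw [hrend]
      simp
    · rw [if_neg h1, if_neg h1]
      have hTle : T ≤ ((PySem.Str.split₀ kv.2).length : Int) := by omega
      by_cases h2 : 0 < e
      · rw [if_pos h2, if_pos h2, ih _ _ hctail, List.zipWith_cons_cons,
          PySem.List.slice_to _ (show (0 : Int) ≤ T - 1 by omega)]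
        have hrend : pvRender kv.2 (T - 1).toNat
            = PySem.Str.join " " ((PySem.Str.split₀ kv.2).take (T - 1).toNat) := by
          unfold pvRender
          rw [if_neg (by omega)]
        rw [hrend]
        simp
      · rw [if_neg h2, if_neg h2, ih _ _ hctail, List.zipWith_cons_cons,
          PySem.List.slice_to _ (show (0 : Int) ≤ T by omega)]
        by_cases h3 : ((PySem.Str.split₀ kv.2).length : Int) = T
        · rw [if_pos (by simp [h3])]
          have hrend : pvRender kv.2 T.toNat = kv.2 := by
            unfold pvRender
            rw [if_pos (by omega)]
          rw [hrend]
          simp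
        · rw [if_neg (by simp [h3])]
          have hrend : pvRender kv.2 T.toNat
              = PySem.Str.join " " ((PySem.Str.split₀ kv.2).take T.toNat) := by
            unfold pvRender
            rw [if_neg (by omega)]
          rw [hrend]
          simp

-- ===== VERDICT (by name: the statement is the Claim_ definition above) =====
-- A's rendered association list, read positionally against the final count list
theorem pv_render_map_zip (bullets : List (String × String)) (F : List Int)
    (hnd : (bullets.map Prod.fst).Nodup) (hlen : F.length = bullets.length) :
    bullets.map (fun kv => (kv.1, pvRender kv.2
        (((PySem.Dict.mk ((bullets.map Prod.fst).zip F)).getD kv.1 0).toNat)))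
      = List.zipWith (fun kv (n : Int) => (kv.1, pvRender kv.2 n.toNat)) bullets F := by
  apply List.ext_getElem
  · rw [List.length_map, List.length_zipWith, hlen, Nat.min_self]
  · intro i h1 h2
    have hib : i < bullets.length := by rwa [List.length_map] at h1
    have hikeys : i < (bullets.map Prod.fst).length := by rwa [List.length_map]
    rw [List.getElem_map, List.getElem_zipWith]
    have hgd := pv_getD_zip (bullets.map Prod.fst) F hnd (by rw [List.length_map, hlen]) i hikeys
    rw [List.getElem_map] at hgd
    rw [hgd]

set_option maxHeartbeats 8000000 in
theorem compress_bullets_py_spec : Claim_equal_compress_bullets_py := by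
  intro bullets W hdom hpre
  unfold Spec_compress_bullets_py
  obtain ⟨hnd, -⟩ := hpre
  have hg0 : ∀ kv ∈ bullets,
      (PySem.Dict.mk (bullets.map (fun p => (p.1, ((PySem.Str.split₀ p.2).length : Int))))).getD kv.1 0
        = ((PySem.Str.split₀ kv.2).length : Int) := by
    intro kv hkv
    exact pv_getD_mk_map bullets (fun p => ((PySem.Str.split₀ p.2).length : Int)) 0 kv hnd hkv
  have hInv0 : pvInv bullets (PySem.Dict.mk bullets)
      (PySem.Dict.mk (bullets.map (fun p => (p.1, ((PySem.Str.split₀ p.2).length : Int))))) := by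
    refine ⟨?_, ?_, ?_⟩
    · show bullets = _
      conv_lhs => rw [← List.map_id bullets]
      apply List.map_congr_left
      intro kv hkv
      rw [id_eq, hg0 kv hkv, Int.toNat_natCast]
      unfold pvRender
      rw [if_pos rfl]
    · simp only [PySem.Dict.keys, List.map_map]
      rfl
    · intro kv hkv
      rw [hg0 kv hkv]
      exact ⟨Int.natCast_nonneg _, by rw [Int.toNat_natCast]⟩
  obtain ⟨hitemsF, -, -⟩ := pv_sim W.toNat bullets hnd _ _ hInv0
  show (pvALoop W.toNat (PySem.Dict.mk bullets)).items = _
  rw [hitemsF]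
  -- the final count dict is the zip of the keys with the list-level process
  have hzip : bullets.map (fun p => (p.1, ((PySem.Str.split₀ p.2).length : Int)))
      = (bullets.map Prod.fst).zip (bullets.map (fun p => ((PySem.Str.split₀ p.2).length : Int))) :=
    (List.zip_map').symm
  have hlen0 : (bullets.map Prod.fst).length
      = (bullets.map (fun p => ((PySem.Str.split₀ p.2).length : Int))).length := by
    rw [List.length_map, List.length_map]
  have hcf : pvCLoop W.toNat (PySem.Dict.mk (bullets.map
        (fun p => (p.1, ((PySem.Str.split₀ p.2).length : Int)))))
      = PySem.Dict.mk ((bullets.map Prod.fst).zip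
          (pvLoopL W.toNat (bullets.map (fun p => ((PySem.Str.split₀ p.2).length : Int))))) := by
    have h := pv_part2 W.toNat (bullets.map Prod.fst)
      (bullets.map (fun p => ((PySem.Str.split₀ p.2).length : Int))) hnd hlen0
    rw [← hzip] at h
    exact h
  have hlenF : (pvLoopL W.toNat (bullets.map (fun p => ((PySem.Str.split₀ p.2).length : Int)))).length
      = bullets.length := by
    rw [pv_length_loopL, List.length_map]
  rw [hcf, pv_render_map_zip bullets _ hnd hlenF]
  -- B's side: unfold the port and fold it into the same zipWith
  have hvals : (PySem.Dict.mk (bullets.map (fun kv => (kv.1, ((PySem.Str.split₀ kv.2).length : Int))))).values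
      = bullets.map (fun p => ((PySem.Str.split₀ p.2).length : Int)) := by
    rw [PySem.Dict.values_mk, List.map_map]
    rfl
  have hb0 : 0 ≤ min (max W 0)
      (pvFB (bullets.map (fun p => ((PySem.Str.split₀ p.2).length : Int))) 5) := by
    have := pvF_nonneg (bullets.map (fun p => ((PySem.Str.split₀ p.2).length : Int))) 5
    rw [pvFB_eq]
    omega
  have hT5 : 5 ≤ pvTheT (bullets.map (fun p => ((PySem.Str.split₀ p.2).length : Int)))
      (min (max W 0) (pvFB (bullets.map (fun p => ((PySem.Str.split₀ p.2).length : Int))) 5)) :=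
    (pvTheT_isT _ _ hb0).1
  simp only [compress_bullets_py_alt, hvals]
  have hTT : pvSearch (bullets.map (fun p => ((PySem.Str.split₀ p.2).length : Int)))
        (min (max W 0) (pvFB (bullets.map (fun p => ((PySem.Str.split₀ p.2).length : Int))) 5)) 5
        (max ((PySem.List.max? (bullets.map (fun p => ((PySem.Str.split₀ p.2).length : Int)))
          (fun v => v)).getD 5) 5)
      = pvTheT (bullets.map (fun p => ((PySem.Str.split₀ p.2).length : Int)))
          (min (max W 0) (pvFB (bullets.map (fun p => ((PySem.Str.split₀ p.2).length : Int))) 5)) := rfl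
  rw [hTT, pv_fold_out _ _ hT5 bullets _ [] hg0, List.nil_append]
  -- identify the removal process with the closed form, and its parameters with B's
  rw [pv_loop_closed]
  unfold pvClosed
  simp only [pvFB_eq]
  rw [Int.toNat_eq_max]
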